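-- pv_equiv track=rewrite | github.com/TianleJin/Algorithmic-Contests-Solutions | Google-Code-Jam/Google-Code-Jam-2020/Round-1A/a.py | solve
-- ===== SOURCE A (Python) =====
-- def mergePrefix(prefixes):
--     ans = ""
--     for p in prefixes:
--         if len(p) > len(ans):
--             ans = p
--     for p in prefixes:
--         if ans.find(p) != 0:
--             return None
--     return ans
--
-- def mergeSuffix(suffixes):
--     ans = mergePrefix([s[::-1] for s in suffixes])
--     if ans is None:
--         return ans
--     return ans[::-1]
--
-- def solve(N, strs):
--     patterns = [s.split('*') for s in strs]
--     prefix = mergePrefix([p[0] for p in patterns])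
--     suffix = mergeSuffix([p[-1] for p in patterns])
--     if prefix is None or suffix is None:
--         return '*'
--     ans = prefix
--     for p in patterns:
--         ans += ''.join(p[1:-1])
--     ans += suffix
--     return ans
-- ===== SOURCE B (Python) =====
-- def merge(a, b):
--     # the longer string if the shorter is a prefix of it, else None
--     if len(a) >= len(b):
--         return a if a.startswith(b) else None
--     return b if b.startswith(a) else None
--
--
-- def fold_merge(pieces):
--     acc = ""
--     for x in pieces:
--         acc = merge(acc, x)
--         if acc is None:
--             return None
--     return acc
--
--
-- def solve(N, strs):
--     patterns = [s.split('*') for s in strs]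
--     prefix = fold_merge(p[0] for p in patterns)
--     suffix_rev = fold_merge(p[-1][::-1] for p in patterns)
--     if prefix is None or suffix_rev is None:
--         return '*'
--     mids = ''.join(''.join(p[1:-1]) for p in patterns)
--     return prefix + mids + suffix_rev[::-1]
-- ===== Notes on version B (the rewrite author's own statement) =====
-- stated objective: alternative
-- what changed: Replaces A's two-pass merge (scan for the longest head, then verify every head is a prefix of it via str.find, symmetrically for tails) by a single accumulating pairwise merge fold: merge(a,b) keeps the longer string when the shorter is its prefix and propagates None, applied once over the heads and once over the reversed tails.
import Mathlib
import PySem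

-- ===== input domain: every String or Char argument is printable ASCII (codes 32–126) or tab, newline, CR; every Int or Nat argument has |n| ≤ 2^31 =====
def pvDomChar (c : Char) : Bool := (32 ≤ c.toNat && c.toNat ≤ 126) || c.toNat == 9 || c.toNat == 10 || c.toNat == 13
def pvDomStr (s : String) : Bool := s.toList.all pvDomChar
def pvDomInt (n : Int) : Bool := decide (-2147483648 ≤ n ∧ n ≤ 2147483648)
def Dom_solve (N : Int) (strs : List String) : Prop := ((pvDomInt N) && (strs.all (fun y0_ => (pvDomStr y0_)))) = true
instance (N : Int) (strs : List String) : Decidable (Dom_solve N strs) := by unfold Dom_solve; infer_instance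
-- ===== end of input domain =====

-- B replaces A's find-longest-then-verify merge by one accumulating pairwise prefix-merge fold
-- (objective: alternative decomposition, same cost).
-- Strings are handled on the List Char side (PySem.Chars); s[::-1] is List.reverse
-- (exact: PySem.Str.slice?_none_none_neg_one), ''.join(list of strings) is List.flatten.

-- ===== PORT A =====
-- first loop of mergePrefix: keep the first longest string seen
def mpScan (ps : List (List Char)) : List Char :=
  ps.foldl (fun ans p => if PySem.Chars.len ans < PySem.Chars.len p then p else ans) []

-- second loop of mergePrefix: return None at the first p with ans.find(p) != 0
def mpCheck (ans : List Char) : List (List Char) → Option (List Char)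
  | [] => some ans
  | p :: rest => if PySem.Chars.find ans p ≠ 0 then none else mpCheck ans rest

def mergePrefixA (ps : List (List Char)) : Option (List Char) :=
  mpCheck (mpScan ps) ps

def mergeSuffixA (ss : List (List Char)) : Option (List Char) :=
  match mergePrefixA (ss.map List.reverse) with
  | none => none
  | some ans => some ans.reverse

def solve (N : Int) (strs : List String) : String :=
  let patterns := strs.map (fun s => PySem.Chars.splitOn s.toList ['*'])
  -- str.split never returns an empty list, so the .getD [] default behind p[0] / p[-1] is unreachable
  let pre := mergePrefixA (patterns.map (fun p => (PySem.List.pyGet? p 0).getD []))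
  let suf := mergeSuffixA (patterns.map (fun p => (PySem.List.pyGet? p (-1)).getD []))
  match pre, suf with
  | some pre, some suf =>
      let ans := patterns.foldl
        (fun a p => a ++ (PySem.List.slice p (some 1) (some (-1))).flatten) pre
      String.ofList (ans ++ suf)
  | _, _ => "*"

-- ===== PORT B =====
-- merge(a, b): the longer string if the shorter is its prefix, else None
def mergeB (a b : List Char) : Option (List Char) :=
  if PySem.Chars.len b ≤ PySem.Chars.len a then
    (if PySem.Chars.startswith a b then some a else none)
  else
    (if PySem.Chars.startswith b a then some b else none)

-- fold_merge: accumulate merge over the pieces starting from "", propagating None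
def foldMergeB (acc : List Char) : List (List Char) → Option (List Char)
  | [] => some acc
  | x :: rest =>
    match mergeB acc x with
    | none => none
    | some acc' => foldMergeB acc' rest

def solve_alt (N : Int) (strs : List String) : String :=
  let patterns := strs.map (fun s => PySem.Chars.splitOn s.toList ['*'])
  let pre := foldMergeB [] (patterns.map (fun p => (PySem.List.pyGet? p 0).getD []))
  let sufr := foldMergeB [] (patterns.map (fun p => ((PySem.List.pyGet? p (-1)).getD []).reverse))
  match pre with
  | none => "*"
  | some pre =>
    match sufr with
    | none => "*"
    | some sr =>
        let mids := (patterns.map (fun p => (PySem.List.slice p (some 1) (some (-1))).flatten)).flatten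
        String.ofList (pre ++ mids ++ sr.reverse)

-- ===== PRECONDITION & SPEC =====
def Spec_solve (N : Int) (strs : List String) (out : String) : Prop := out = solve_alt N strs
instance (N : Int) (strs : List String) (out : String) : Decidable (Spec_solve N strs out) := by unfold Spec_solve; infer_instance

-- ===== CLAIM (what is proved, stated in full; the proofs are below) =====
def Claim_equal_solve : Prop := ∀ (N : Int) (strs : List String), Dom_solve N strs → Spec_solve N strs (solve N strs)

-- ===== LEMMAS AND PROOFS =====

-- generalised form of A's first loop (mpScan ps = mScan [] ps)
def mScan (a : List Char) (ps : List (List Char)) : List Char :=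
  ps.foldl (fun ans p => if PySem.Chars.len ans < PySem.Chars.len p then p else ans) a

lemma mScan_nil (a : List Char) : mScan a [] = a := rfl

lemma mScan_cons (a p : List Char) (ps : List (List Char)) :
    mScan a (p :: ps) = mScan (if PySem.Chars.len a < PySem.Chars.len p then p else a) ps := rfl

lemma find_eq_zero_iff (ans p : List Char) : PySem.Chars.find ans p = 0 ↔ p <+: ans := by
  constructor
  · intro h
    have h0 : 0 ≤ PySem.Chars.find ans p := by omega
    have := (PySem.Chars.find_spec h0).1
    rwa [h] at this
    
  · intro hp
    have h0 : 0 ≤ PySem.Chars.find ans p := by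
      rw [PySem.Chars.find_nonneg_iff]
      exact hp.isInfix
    rcases PySem.Chars.find_spec h0 with ⟨_, hmin⟩
    by_contra hne
    have hpos : 0 < (PySem.Chars.find ans p).toNat := by omega
    exact hmin 0 hpos (by simpa using hp)

lemma mpCheck_eq (ans : List Char) (ps : List (List Char)) :
    mpCheck ans ps = if ps.all (fun p => decide (p <+: ans)) then some ans else none := by
  induction ps with
  | nil => rfl
  | cons p rest ih =>
    by_cases hp : p <+: ans
    · have : PySem.Chars.find ans p = 0 := (find_eq_zero_iff ans p).mpr hp
      simp [mpCheck, this, hp, ih]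
    · have : PySem.Chars.find ans p ≠ 0 := fun h => hp ((find_eq_zero_iff ans p).mp h)
      simp [mpCheck, this, hp]

lemma foldMergeB_eq (ps : List (List Char)) : ∀ a : List Char,
    foldMergeB a ps =
      if (a :: ps).all (fun p => decide (p <+: mScan a ps)) then some (mScan a ps) else none := by
  induction ps with
  | nil => intro a; simp [foldMergeB, mScan_nil]
  | cons p rest ih =>
    intro a
    rw [mScan_cons]
    by_cases hl : PySem.Chars.len p ≤ PySem.Chars.len a
    · have hl' : ¬ PySem.Chars.len a < PySem.Chars.len p := not_lt.mpr hl
      have hlen : p.length ≤ a.length := by simpa [PySem.Chars.len_eq] using hl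
      simp only [hl', if_neg, not_false_iff]
      by_cases hp : p <+: a
      · have hs : PySem.Chars.startswith a p = true := (PySem.Chars.startswith_iff a p).mpr hp
        have : foldMergeB a (p :: rest) = foldMergeB a rest := by
          simp [foldMergeB, mergeB, hlen, hs]
        rw [this, ih a]
        have hM : a <+: mScan a rest → p <+: mScan a rest := fun h => hp.trans h
        by_cases hc : (a :: rest).all (fun q => decide (q <+: mScan a rest))
        · have hc' : ((a :: p :: rest).all (fun q => decide (q <+: mScan a rest))) = true := by
            simp only [List.all_cons, Bool.and_eq_true, decide_eq_true_eq] at hc ⊢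
            exact ⟨hc.1, hM hc.1, hc.2⟩
          simp [hc, hc']
        · have hc' : ¬ ((a :: p :: rest).all (fun q => decide (q <+: mScan a rest)) = true) := by
            simp only [List.all_cons, Bool.and_eq_true, decide_eq_true_eq] at hc ⊢
            intro h; exact hc ⟨h.1, h.2.2⟩
          simp [hc, hc']
      · have hs : PySem.Chars.startswith a p = false := by
          rw [Bool.eq_false_iff]
          intro h; exact hp ((PySem.Chars.startswith_iff a p).mp h)
        have hnone : foldMergeB a (p :: rest) = none := by
          simp [foldMergeB, mergeB, hlen, hs]
        rw [hnone]
        have hc' : ¬ ((a :: p :: rest).all (fun q => decide (q <+: mScan a rest)) = true) := by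
          simp only [List.all_cons, Bool.and_eq_true, decide_eq_true_eq]
          rintro ⟨ha, hpp, -⟩
          exact hp (List.prefix_of_prefix_length_le hpp ha hlen)
        simp [hc']
    · have hl' : PySem.Chars.len a < PySem.Chars.len p := not_le.mp hl
      have hlen : a.length ≤ p.length := by
        simpa [PySem.Chars.len_eq] using le_of_lt hl'
      have hlen2 : ¬ p.length ≤ a.length := by
        simpa [PySem.Chars.len_eq] using hl
      simp only [hl', if_pos]
      by_cases ha : a <+: p
      · have hs : PySem.Chars.startswith p a = true := (PySem.Chars.startswith_iff p a).mpr ha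
        have : foldMergeB a (p :: rest) = foldMergeB p rest := by
          simp [foldMergeB, mergeB, hlen2, hs]
        rw [this, ih p]
        by_cases hc : (p :: rest).all (fun q => decide (q <+: mScan p rest))
        · have hc' : ((a :: p :: rest).all (fun q => decide (q <+: mScan p rest))) = true := by
            simp only [List.all_cons, Bool.and_eq_true, decide_eq_true_eq] at hc ⊢
            exact ⟨ha.trans hc.1, hc.1, hc.2⟩
          simp [hc, hc']
        · have hc' : ¬ ((a :: p :: rest).all (fun q => decide (q <+: mScan p rest)) = true) := by
            simp only [List.all_cons, Bool.and_eq_true, decide_eq_true_eq] at hc ⊢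
            intro h; exact hc ⟨h.2.1, h.2.2⟩
          simp [hc, hc']
      · have hs : PySem.Chars.startswith p a = false := by
          rw [Bool.eq_false_iff]
          intro h; exact ha ((PySem.Chars.startswith_iff p a).mp h)
        have hnone : foldMergeB a (p :: rest) = none := by
          simp [foldMergeB, mergeB, hlen2, hs]
        rw [hnone]
        have hc' : ¬ ((a :: p :: rest).all (fun q => decide (q <+: mScan p rest)) = true) := by
          simp only [List.all_cons, Bool.and_eq_true, decide_eq_true_eq]
          rintro ⟨hap, hpp, -⟩
          exact ha (List.prefix_of_prefix_length_le hap hpp hlen)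
        simp [hc']

lemma mergePrefixA_eq (ps : List (List Char)) : mergePrefixA ps = foldMergeB [] ps := by
  have hscan : mpScan ps = mScan [] ps := rfl
  rw [mergePrefixA, hscan, mpCheck_eq, foldMergeB_eq]
  simp [List.nil_prefix]

-- ===== VERDICT (by name: the statement is the Claim_ definition above) =====
theorem solve_spec : Claim_equal_solve := by
  intro N strs _
  unfold Spec_solve solve solve_alt
  simp only []
  rw [mergeSuffixA, mergePrefixA_eq, mergePrefixA_eq]
  have hmap : (List.map (fun s => PySem.Chars.splitOn s.toList ['*']) strs |>.map
      (fun p => (PySem.List.pyGet? p (-1)).getD [])).map List.reverse =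
      (List.map (fun s => PySem.Chars.splitOn s.toList ['*']) strs).map
      (fun p => ((PySem.List.pyGet? p (-1)).getD []).reverse) := by
    simp [List.map_map, Function.comp]
  rw [hmap]
  cases hpre : foldMergeB []
      ((List.map (fun s => PySem.Chars.splitOn s.toList ['*']) strs).map
        (fun p => (PySem.List.pyGet? p 0).getD [])) with
  | none =>
      cases hsuf : foldMergeB []
          ((List.map (fun s => PySem.Chars.splitOn s.toList ['*']) strs).map
            (fun p => ((PySem.List.pyGet? p (-1)).getD []).reverse)) with
      | none => rfl
      | some sr => rfl
  | some pre =>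
      cases hsuf : foldMergeB []
          ((List.map (fun s => PySem.Chars.splitOn s.toList ['*']) strs).map
            (fun p => ((PySem.List.pyGet? p (-1)).getD []).reverse)) with
      | none => rfl
      | some sr =>
          simp only []
          rw [PySem.List.foldl_append_eq_flatMap
            (fun p => (PySem.List.slice p (some 1) (some (-1))).flatten)]
          simp [List.flatMap_def, List.append_assoc]
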